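-- pv_equiv track=rewrite | github.com/nishanthCACS/Cancer-protein-functional-detection | PDB_Gene_Mapping/spring_2019/intialised/MOTIF_included_vin_1.py | sel_atom_helper_way
-- ===== SOURCE A (Python) =====
-- def sel_atom_helper_way(radius,range_of_xy,range_of_xy_z):
--     # then just check the
--     checked_range_element = []
--     selected_atom = []
--     for i in range(0,len(range_of_xy)):
--         r=radius[i]
--         s=i#to hold the selected item in surface
--         if i not in checked_range_element:
--           checked_range_element.append(i)
--           for j in range(0,len(range_of_xy)):
--             if(range_of_xy[i]==range_of_xy[j]):
--               if(range_of_xy_z[i]==range_of_xy_z[j]):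
--                 checked_range_element.append(j)
--                 if(r<radius[j]):
--                   r=radius[j]
--                   s=j
--           selected_atom.append(s)
--     return selected_atom
-- ===== SOURCE B (Python) =====
-- def sel_atom_helper_way(radius, range_of_xy, range_of_xy_z):
--     # one pass: per coordinate key keep the index of the largest radius seen so far
--     best = {}
--     for j in range(len(range_of_xy)):
--         k = (range_of_xy[j], range_of_xy_z[j])
--         b = best.get(k)
--         if b is None or radius[b] < radius[j]:
--             best[k] = j
--     return list(best.values())
-- ===== Notes on version B (the rewrite author's own statement) =====
-- stated objective: faster
-- what changed: Replaces A's quadratic nested rescan (per new group, a full inner pass over all atoms plus a growing 'checked' membership list) by a single pass that keeps, in an insertion-ordered dict keyed by (xy, z), the index of the strictly-largest radius seen so far, returning the dict's values.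
import Mathlib
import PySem

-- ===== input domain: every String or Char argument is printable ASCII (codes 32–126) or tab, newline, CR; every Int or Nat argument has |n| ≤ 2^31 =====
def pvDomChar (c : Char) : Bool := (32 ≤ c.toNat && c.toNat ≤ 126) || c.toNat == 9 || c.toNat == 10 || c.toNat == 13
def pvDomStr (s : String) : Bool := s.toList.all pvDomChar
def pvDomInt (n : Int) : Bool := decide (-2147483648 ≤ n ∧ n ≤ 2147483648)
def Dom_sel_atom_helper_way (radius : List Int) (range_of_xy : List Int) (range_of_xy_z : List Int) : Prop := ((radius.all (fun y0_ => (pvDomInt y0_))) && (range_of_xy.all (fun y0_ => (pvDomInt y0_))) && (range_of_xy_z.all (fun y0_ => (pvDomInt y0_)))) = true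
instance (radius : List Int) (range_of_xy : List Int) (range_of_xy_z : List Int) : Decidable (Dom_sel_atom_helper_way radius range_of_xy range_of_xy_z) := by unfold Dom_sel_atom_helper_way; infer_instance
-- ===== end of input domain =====

-- B replaces A's quadratic nested rescan by a single pass keeping, per (xy,z) key, the
-- index of the largest radius so far in an insertion-ordered dict (faster, as measured).


-- ===== PORT A =====
-- inner 'for j' loop of A: state (r, s, checked)
def selAInner (radius : List Int) (range_of_xy : List Int) (range_of_xy_z : List Int)
    (i : Int) : List Int → Int → Int → List Int → Int × Int × List Int
  | [], r, s, checked => (r, s, checked)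
  | j :: js, r, s, checked =>
    if PySem.List.pyGetD range_of_xy i 0 = PySem.List.pyGetD range_of_xy j 0 then
      if PySem.List.pyGetD range_of_xy_z i 0 = PySem.List.pyGetD range_of_xy_z j 0 then
        let checked' := checked ++ [j]
        if r < PySem.List.pyGetD radius j 0 then
          selAInner radius range_of_xy range_of_xy_z i js (PySem.List.pyGetD radius j 0) j checked'
        else
          selAInner radius range_of_xy range_of_xy_z i js r s checked'
      else selAInner radius range_of_xy range_of_xy_z i js r s checked
    else selAInner radius range_of_xy range_of_xy_z i js r s checked

-- outer 'for i' loop of A: state (checked_range_element, selected_atom)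
def selAOuter (radius : List Int) (range_of_xy : List Int) (range_of_xy_z : List Int)
    (js : List Int) : List Int → List Int → List Int → List Int
  | [], _, selected => selected
  | i :: is, checked, selected =>
    if checked.contains i then
      selAOuter radius range_of_xy range_of_xy_z js is checked selected
    else
      let checked' := checked ++ [i]
      let res := selAInner radius range_of_xy range_of_xy_z i js (PySem.List.pyGetD radius i 0) i checked'
      selAOuter radius range_of_xy range_of_xy_z js is res.2.2 (selected ++ [res.2.1])

def sel_atom_helper_way (radius : List Int) (range_of_xy : List Int) (range_of_xy_z : List Int) : List Int :=
  let js := PySem.List.pyRange 0 (range_of_xy.length : Int) 1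
  selAOuter radius range_of_xy range_of_xy_z js js [] []

-- ===== PORT B =====
-- one-pass loop of B over the dict 'best'
def selBLoop (radius : List Int) (range_of_xy : List Int) (range_of_xy_z : List Int) :
    List Int → PySem.Dict (Int × Int) Int → PySem.Dict (Int × Int) Int
  | [], d => d
  | j :: js, d =>
    let k : Int × Int := (PySem.List.pyGetD range_of_xy j 0, PySem.List.pyGetD range_of_xy_z j 0)
    match d.get? k with
    | none => selBLoop radius range_of_xy range_of_xy_z js (d.insert k j)
    | some b =>
      if PySem.List.pyGetD radius b 0 < PySem.List.pyGetD radius j 0 then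
        selBLoop radius range_of_xy range_of_xy_z js (d.insert k j)
      else
        selBLoop radius range_of_xy range_of_xy_z js d

def sel_atom_helper_way_alt (radius : List Int) (range_of_xy : List Int) (range_of_xy_z : List Int) : List Int :=
  (selBLoop radius range_of_xy range_of_xy_z (PySem.List.pyRange 0 (range_of_xy.length : Int) 1) PySem.Dict.empty).values

-- ===== PRECONDITION & SPEC =====
-- Pre_: exactly where Python A returns normally — with fewer radii or z-coordinates than
-- xy-coordinates A raises IndexError (radius[i] unconditionally, range_of_xy_z[i] at each
-- first occurrence i).
def Pre_sel_atom_helper_way (radius : List Int) (range_of_xy : List Int) (range_of_xy_z : List Int) : Prop :=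
  range_of_xy.length ≤ radius.length ∧ range_of_xy.length ≤ range_of_xy_z.length
instance (radius : List Int) (range_of_xy : List Int) (range_of_xy_z : List Int) : Decidable (Pre_sel_atom_helper_way radius range_of_xy range_of_xy_z) := by unfold Pre_sel_atom_helper_way; infer_instance

def pvWitness_sel_atom_helper_way : List Int × List Int × List Int := ([3, 1, 2], [5, 5, 7], [1, 1, 1])

def Spec_sel_atom_helper_way (radius : List Int) (range_of_xy : List Int) (range_of_xy_z : List Int) (out : List Int) : Prop := out = sel_atom_helper_way_alt radius range_of_xy range_of_xy_z
instance (radius : List Int) (range_of_xy : List Int) (range_of_xy_z : List Int) (out : List Int) : Decidable (Spec_sel_atom_helper_way radius range_of_xy range_of_xy_z out) := by unfold Spec_sel_atom_helper_way; infer_instance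

-- ===== CLAIM (what is proved, stated in full; the proofs are below) =====
def Claim_equal_sel_atom_helper_way : Prop := ∀ (radius : List Int) (range_of_xy : List Int) (range_of_xy_z : List Int), Dom_sel_atom_helper_way radius range_of_xy range_of_xy_z → Pre_sel_atom_helper_way radius range_of_xy range_of_xy_z → Spec_sel_atom_helper_way radius range_of_xy range_of_xy_z (sel_atom_helper_way radius range_of_xy range_of_xy_z)

-- ===== LEMMAS AND PROOFS =====

-- abbreviations for the proofs
def pvKey (xy z : List Int) (j : Int) : Int × Int := (PySem.List.pyGetD xy j 0, PySem.List.pyGetD z j 0)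
def pvPick (radius : List Int) (s j : Int) : Int :=
  if PySem.List.pyGetD radius s 0 < PySem.List.pyGetD radius j 0 then j else s
def pvAmax (radius : List Int) (s : Int) (l : List Int) : Int := l.foldl (pvPick radius) s
def pvStep (radius : List Int) (p : Int × Int) (j : Int) : Int × Int :=
  if p.1 < PySem.List.pyGetD radius j 0 then (PySem.List.pyGetD radius j 0, j) else p
def pvFoldO (radius : List Int) : Option Int → List Int → Option Int
  | o, [] => o
  | none, j :: t => pvFoldO radius (some j) t
  | some b, j :: t => pvFoldO radius (some (pvPick radius b j)) t
def pvGrp (xy z : List Int) (js : List Int) (k : Int × Int) : List Int :=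
  js.filter (fun j => decide (pvKey xy z j = k))
def pvDedup (xy z : List Int) : List Int → List (Int × Int) → List Int
  | [], _ => []
  | i :: t, K =>
    if pvKey xy z i ∈ K then pvDedup xy z t K
    else i :: pvDedup xy z t (K ++ [pvKey xy z i])

lemma selAInner_eq (radius xy z : List Int) (i : Int) :
    ∀ (js : List Int) (r s : Int) (checked : List Int),
    selAInner radius xy z i js r s checked =
      (((pvGrp xy z js (pvKey xy z i)).foldl (pvStep radius) (r, s)).1,
       ((pvGrp xy z js (pvKey xy z i)).foldl (pvStep radius) (r, s)).2,
       checked ++ pvGrp xy z js (pvKey xy z i)) := by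
  intro js
  induction js with
  | nil => intro r s checked; simp [selAInner, pvGrp]
  | cons j t ih =>
    intro r s checked
    by_cases hx : PySem.List.pyGetD xy i 0 = PySem.List.pyGetD xy j 0
    · by_cases hz : PySem.List.pyGetD z i 0 = PySem.List.pyGetD z j 0
      · have hk : pvKey xy z j = pvKey xy z i := by simp [pvKey, hx.symm, hz.symm]
        by_cases hr : r < PySem.List.pyGetD radius j 0
        · simp only [selAInner, hx, hz, hr, if_true, pvGrp, List.filter_cons, hk,
            decide_eq_true_eq, List.foldl_cons, pvStep]
          rw [ih]
          simp [pvGrp]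
        · simp only [selAInner, hx, hz, hr, if_true, if_false, pvGrp, List.filter_cons, hk,
            decide_eq_true_eq, List.foldl_cons, pvStep]
          rw [ih]
          simp [pvGrp]
      · have hk : ¬ (pvKey xy z j = pvKey xy z i) := by
          simp [pvKey]; intro _; exact fun h => hz h.symm
        simp only [selAInner, hx, hz, if_true, if_false]
        rw [ih]
        simp [pvGrp, List.filter_cons, hk]
    · have hk : ¬ (pvKey xy z j = pvKey xy z i) := by
        simp [pvKey]; intro h; exact absurd h.symm hx
      simp only [selAInner, hx, if_false]
      rw [ih]
      simp [pvGrp, List.filter_cons, hk]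

lemma foldl_pvStep_eq (radius : List Int) :
    ∀ (l : List Int) (s : Int),
    l.foldl (pvStep radius) (PySem.List.pyGetD radius s 0, s) =
      (PySem.List.pyGetD radius (pvAmax radius s l) 0, pvAmax radius s l) := by
  intro l
  induction l with
  | nil => intro s; simp [pvAmax]
  | cons j t ih =>
    intro s
    simp only [List.foldl_cons, pvAmax, pvStep, pvPick]
    by_cases h : PySem.List.pyGetD radius s 0 < PySem.List.pyGetD radius j 0
    · simpa [h, pvAmax] using ih j
    · simpa [h, pvAmax] using ih s

lemma selAOuter_eq (radius xy z : List Int) (js : List Int) :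
    ∀ (is : List Int) (K : List (Int × Int)) (checked selected : List Int),
    (∀ i ∈ is, i ∈ js) →
    (∀ t : Int, t ∈ checked ↔ (t ∈ js ∧ pvKey xy z t ∈ K)) →
    selAOuter radius xy z js is checked selected =
      selected ++ (pvDedup xy z is K).map (fun i => pvAmax radius i (pvGrp xy z js (pvKey xy z i))) := by
  intro is
  induction is with
  | nil => intro K checked selected _ _; simp [selAOuter, pvDedup]
  | cons i t ih =>
    intro K checked selected hsub hchk
    have hij : i ∈ js := hsub i (by simp)
    by_cases hc : i ∈ checked
    · have hcon : checked.contains i = true := List.contains_iff_mem.mpr hc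
      have hkK : pvKey xy z i ∈ K := ((hchk i).mp hc).2
      rw [selAOuter, if_pos hcon, pvDedup, if_pos hkK]
      exact ih K checked selected (fun a ha => hsub a (by simp [ha])) hchk
    · have hkK : pvKey xy z i ∉ K := fun hm => hc ((hchk i).mpr ⟨hij, hm⟩)
      rw [selAOuter, if_neg (by simpa [List.contains_iff_mem] using hc), pvDedup, if_neg hkK]
      simp only [selAInner_eq, foldl_pvStep_eq]
      rw [ih (K ++ [pvKey xy z i]) _ _ (fun a ha => hsub a (by simp [ha]))]
      · simp [pvAmax]
      · intro u
        constructor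
        · intro hu
          rcases List.mem_append.mp hu with hu | hu
          · rcases List.mem_append.mp hu with hu | hu
            · rcases (hchk u).mp hu with ⟨h1, h2⟩; exact ⟨h1, by simp [h2]⟩
            · simp at hu; subst hu; exact ⟨hij, by simp⟩
          · have := List.mem_filter.mp hu
            exact ⟨this.1, by simp [of_decide_eq_true this.2]⟩
        · rintro ⟨h1, h2⟩
          rcases (by simpa using h2 : pvKey xy z u ∈ K ∨ pvKey xy z u = pvKey xy z i) with h2 | h2
          · exact List.mem_append.mpr (Or.inl (List.mem_append.mpr (Or.inl ((hchk u).mpr ⟨h1, h2⟩))))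
          · exact List.mem_append.mpr (Or.inr (List.mem_filter.mpr ⟨h1, by simp [h2]⟩))

lemma set_update_eq_dedup (xy z : List Int) :
    ∀ (is : List Int) (K : List (Int × Int)),
    PySem.Set.update K (is.map (pvKey xy z)) = K ++ (pvDedup xy z is K).map (pvKey xy z) := by
  intro is
  induction is with
  | nil => intro K; simp [pvDedup, PySem.Set.update]
  | cons i t ih =>
    intro K
    by_cases h : pvKey xy z i ∈ K
    · have hadd : PySem.Set.add K (pvKey xy z i) = K := by
        simp [PySem.Set.add, List.contains_iff_mem, h]
      simp only [List.map_cons, PySem.Set.update, List.foldl_cons] at *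
      rw [hadd, pvDedup, if_pos h]
      exact ih K
    · have hadd : PySem.Set.add K (pvKey xy z i) = K ++ [pvKey xy z i] := by
        simp [PySem.Set.add, List.contains_iff_mem, h]
      simp only [List.map_cons, PySem.Set.update, List.foldl_cons] at *
      rw [hadd, pvDedup, if_neg h, ih]
      simp

lemma dedup_not_mem (xy z : List Int) :
    ∀ (is : List Int) (K : List (Int × Int)) (i : Int),
    i ∈ pvDedup xy z is K → pvKey xy z i ∉ K := by
  intro is
  induction is with
  | nil => intro K i h; simp [pvDedup] at h
  | cons j t ih =>
    intro K i h
    by_cases hj : pvKey xy z j ∈ K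
    · rw [pvDedup, if_pos hj] at h; exact ih K i h
    · rw [pvDedup, if_neg hj] at h
      rcases List.mem_cons.mp h with h | h
      · subst h; exact hj
      · intro hK; exact (ih _ i h) (by simp [hK])

lemma dedup_first_occ (xy z : List Int) :
    ∀ (is : List Int) (K : List (Int × Int)) (i : Int),
    i ∈ pvDedup xy z is K → ∃ l, pvGrp xy z is (pvKey xy z i) = i :: l := by
  intro is
  induction is with
  | nil => intro K i h; simp [pvDedup] at h
  | cons j t ih =>
    intro K i h
    by_cases hj : pvKey xy z j ∈ K
    · rw [pvDedup, if_pos hj] at h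
      have hne : ¬ (pvKey xy z j = pvKey xy z i) := by
        intro he; exact (dedup_not_mem xy z t K i h) (he ▸ hj)
      simpa [pvGrp, List.filter_cons, hne] using ih K i h
    · rw [pvDedup, if_neg hj] at h
      rcases List.mem_cons.mp h with h | h
      · subst h; exact ⟨t.filter (fun j => decide (pvKey xy z j = pvKey xy z i)), by simp [pvGrp, List.filter_cons]⟩
      · have hni := dedup_not_mem xy z t _ i h
        have hne : ¬ (pvKey xy z j = pvKey xy z i) := by
          intro he; exact hni (by simp [he])
        simpa [pvGrp, List.filter_cons, hne] using ih _ i h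

lemma selBLoop_keys (radius xy z : List Int) :
    ∀ (is : List Int) (d : PySem.Dict (Int × Int) Int),
    (selBLoop radius xy z is d).keys = PySem.Set.update d.keys (is.map (pvKey xy z)) := by
  intro is
  induction is with
  | nil => intro d; simp [selBLoop, PySem.Set.update]
  | cons j t ih =>
    intro d
    have hupd : ∀ dk, PySem.Set.update dk (List.map (pvKey xy z) (j :: t)) =
        PySem.Set.update (PySem.Set.add dk (pvKey xy z j)) (List.map (pvKey xy z) t) := by
      intro dk; simp [PySem.Set.update]
    rw [hupd]
    cases hg : d.get? (pvKey xy z j) with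
    | none =>
      have hc : d.contains (pvKey xy z j) = false :=
        (PySem.Dict.get?_eq_none_iff_contains d _).mp hg
      have hadd : PySem.Set.add d.keys (pvKey xy z j) = d.keys ++ [pvKey xy z j] := by
        have : ¬ pvKey xy z j ∈ d.keys := fun hm =>
          by simp [(PySem.Dict.contains_iff_mem_keys d _).mpr hm] at hc
        simp [PySem.Set.add, List.contains_iff_mem, this]
      simp only [selBLoop, pvKey] at *
      rw [hg]; dsimp only
      rw [ih, PySem.Dict.keys_insert_of_not_contains d j hc, hadd]
    | some b =>
      have hc : d.contains (pvKey xy z j) = true := by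
        rw [PySem.Dict.contains_eq_isSome_get?, hg]; rfl
      have hadd : PySem.Set.add d.keys (pvKey xy z j) = d.keys := by
        have : pvKey xy z j ∈ d.keys := (PySem.Dict.contains_iff_mem_keys d _).mp hc
        simp [PySem.Set.add, List.contains_iff_mem, this]
      have hkeys : (d.insert (pvKey xy z j) j).keys = d.keys :=
        PySem.Dict.keys_insert_of_contains d j hc
      simp only [selBLoop, pvKey] at *
      rw [hg]; dsimp only
      by_cases hr : PySem.List.pyGetD radius b 0 < PySem.List.pyGetD radius j 0
      · rw [if_pos hr, ih, hkeys, hadd]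
      · rw [if_neg hr, ih, hadd]

lemma selBLoop_nodup (radius xy z : List Int) :
    ∀ (is : List Int) (d : PySem.Dict (Int × Int) Int),
    d.keys.Nodup → (selBLoop radius xy z is d).keys.Nodup := by
  intro is
  induction is with
  | nil => intro d h; simpa [selBLoop] using h
  | cons j t ih =>
    intro d h
    simp only [selBLoop]
    cases hg : d.get? ((PySem.List.pyGetD xy j 0, PySem.List.pyGetD z j 0) : Int × Int) with
    | none => dsimp only; exact ih _ (PySem.Dict.nodup_keys_insert d _ j h)
    | some b =>
      dsimp only
      by_cases hr : PySem.List.pyGetD radius b 0 < PySem.List.pyGetD radius j 0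
      · rw [if_pos hr]; exact ih _ (PySem.Dict.nodup_keys_insert d _ j h)
      · rw [if_neg hr]; exact ih _ h

lemma selBLoop_get? (radius xy z : List Int) :
    ∀ (is : List Int) (d : PySem.Dict (Int × Int) Int) (k : Int × Int),
    (selBLoop radius xy z is d).get? k = pvFoldO radius (d.get? k) (pvGrp xy z is k) := by
  intro is
  induction is with
  | nil => intro d k; simp [selBLoop, pvGrp, pvFoldO]
  | cons j t ih =>
    intro d k
    simp only [selBLoop]
    by_cases hk : pvKey xy z j = k
    · subst hk
      cases hg : d.get? (pvKey xy z j) with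
      | none =>
        rw [show ((PySem.List.pyGetD xy j 0, PySem.List.pyGetD z j 0) : Int × Int) = pvKey xy z j from rfl] at *
        rw [hg]; dsimp only
        rw [ih, PySem.Dict.get?_insert_self]
        simp [pvFoldO, pvGrp, List.filter_cons]
      | some b =>
        rw [show ((PySem.List.pyGetD xy j 0, PySem.List.pyGetD z j 0) : Int × Int) = pvKey xy z j from rfl] at *
        rw [hg]; dsimp only
        have hfil : pvGrp xy z (j :: t) (pvKey xy z j) = j :: pvGrp xy z t (pvKey xy z j) := by
          simp [pvGrp, List.filter_cons]
        rw [hfil]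
        by_cases hr : PySem.List.pyGetD radius b 0 < PySem.List.pyGetD radius j 0
        · rw [if_pos hr, ih, PySem.Dict.get?_insert_self]
          simp [pvFoldO, pvPick, hr]
        · rw [if_neg hr, ih]
          simp [pvFoldO, pvPick, hr, hg]
    · have hfil : pvGrp xy z (j :: t) k = pvGrp xy z t k := by
        simp [pvGrp, List.filter_cons, hk]
      rw [show ((PySem.List.pyGetD xy j 0, PySem.List.pyGetD z j 0) : Int × Int) = pvKey xy z j from rfl]
      cases hg : d.get? (pvKey xy z j) with
      | none =>
        dsimp only
        rw [ih, PySem.Dict.get?_insert_of_ne _ _ (Ne.symm hk), hfil]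
      | some b =>
        dsimp only
        by_cases hr : PySem.List.pyGetD radius b 0 < PySem.List.pyGetD radius j 0
        · rw [if_pos hr, ih, PySem.Dict.get?_insert_of_ne _ _ (Ne.symm hk), hfil]
        · rw [if_neg hr, ih, hfil]

lemma pvFoldO_some (radius : List Int) :
    ∀ (l : List Int) (b : Int), pvFoldO radius (some b) l = some (pvAmax radius b l) := by
  intro l
  induction l with
  | nil => intro b; simp [pvFoldO, pvAmax]
  | cons j t ih => intro b; simp only [pvFoldO, pvAmax, List.foldl_cons]; exact ih _

lemma pvPick_self (radius : List Int) (i : Int) : pvPick radius i i = i := by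
  simp [pvPick]

-- ===== VERDICT (by name: the statement is the Claim_ definition above) =====
theorem sel_atom_helper_way_spec : Claim_equal_sel_atom_helper_way := by
  intro radius xy z _ _
  unfold Spec_sel_atom_helper_way sel_atom_helper_way sel_atom_helper_way_alt
  dsimp only
  rw [selAOuter_eq radius xy z _ _ [] [] [] (fun i h => h) (by simp)]
  have hnd : (selBLoop radius xy z (PySem.List.pyRange 0 (xy.length : Int) 1) PySem.Dict.empty).keys.Nodup :=
    selBLoop_nodup radius xy z _ _ (by simp [PySem.Dict.keys_empty])
  rw [PySem.Dict.values_eq_map_keys _ hnd 0]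
  rw [selBLoop_keys, PySem.Dict.keys_empty]
  rw [show (PySem.Set.update ([] : PySem.Set (Int × Int)) ((PySem.List.pyRange 0 (xy.length : Int) 1).map (pvKey xy z))) =
      (pvDedup xy z (PySem.List.pyRange 0 (xy.length : Int) 1) []).map (pvKey xy z) from by
    rw [set_update_eq_dedup]; simp]
  rw [List.map_map, List.nil_append]
  apply List.map_congr_left
  intro i hi
  obtain ⟨l, hl⟩ := dedup_first_occ xy z _ [] i hi
  have hget : (selBLoop radius xy z (PySem.List.pyRange 0 (xy.length : Int) 1) PySem.Dict.empty).get? (pvKey xy z i)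
      = some (pvAmax radius i l) := by
    rw [selBLoop_get?, PySem.Dict.get?_empty, hl]
    simp [pvFoldO, pvFoldO_some]
  simp only [Function.comp, PySem.Dict.getD_eq_get?_getD, hget, Option.getD_some]
  rw [hl]
  simp [pvAmax, pvPick_self]
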